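-- pv_equiv track=rewrite | github.com/drewcmaier/leetcode | 290/word_pattern.py | createIndexMap
-- ===== SOURCE A (Python) =====
-- def createIndexMap(iterable):
--     map = {}
--     cur_index = 0
--     for i in range(0, len(iterable)):
--         if iterable[i] not in map:
--             map[iterable[i]] = cur_index
--             cur_index += 1
--
--     return map
-- ===== SOURCE B (Python) =====
-- def createIndexMap(iterable):
--     # Stateless per-element formulation: a first occurrence's rank equals the
--     # number of distinct elements strictly before it; no dict/counter state.
--     n = len(iterable)
--     return {iterable[i]: len({iterable[j] for j in range(i)})
--             for i in range(n)
--             if iterable.index(iterable[i]) == i}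
-- ===== Notes on version B (the rewrite author's own statement) =====
-- stated objective: alternative
-- what changed: A's single stateful scan (dict membership plus a running counter) is replaced by a stateless per-element formulation: keep exactly the first occurrences (iterable.index(x) == i) and compute each rank independently as the number of distinct elements in the strict prefix, trading the accumulator for per-element prefix scans.
import Mathlib
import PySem

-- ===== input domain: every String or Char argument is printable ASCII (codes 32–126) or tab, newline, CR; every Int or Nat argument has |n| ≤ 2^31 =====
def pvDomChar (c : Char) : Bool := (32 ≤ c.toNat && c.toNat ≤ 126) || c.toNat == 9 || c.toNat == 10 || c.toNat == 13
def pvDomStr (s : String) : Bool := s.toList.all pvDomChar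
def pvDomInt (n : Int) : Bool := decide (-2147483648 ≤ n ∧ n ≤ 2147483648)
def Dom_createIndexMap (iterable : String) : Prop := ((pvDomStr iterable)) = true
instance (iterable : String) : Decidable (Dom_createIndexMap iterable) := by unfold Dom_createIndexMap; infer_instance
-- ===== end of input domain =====

-- B replaces A's stateful scan (dict + running counter) by a stateless per-element
-- formulation: first occurrences keyed to the distinct-count of their strict prefix
-- (alternative decomposition, not faster).


-- ===== PORT A =====
-- iterable[i] over range(len(iterable)) visits each character of the string in order,
-- as a one-character string (exact on any string input).
def createIndexMap (iterable : String) : List (String × Int) :=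
  (iterable.toList.foldl
    (fun (st : PySem.Dict String Int × Int) c =>
      if st.1.contains (String.ofList [c]) then st
      else (st.1.insert (String.ofList [c]) st.2, st.2 + 1))
    ((PySem.Dict.empty : PySem.Dict String Int), 0)).1.items

-- ===== PORT B =====
-- Dict comprehension over i in range(n), filtered by iterable.index(iterable[i]) == i
-- (first occurrences, so keys are distinct and the items list is the filtered order);
-- each value is len({iterable[j] for j in range(i)}), the prefix's distinct count.
-- i ranges over [0, n) so getD never hits its default.
def createIndexMap_alt (iterable : String) : List (String × Int) :=
  let cs := iterable.toList
  (List.range cs.length).filterMap (fun i =>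
    if PySem.List.index? cs (cs.getD i default) = some i
    then some (String.ofList [cs.getD i default],
               ((PySem.Set.ofList (cs.take i)).length : Int))
    else none)

-- ===== PRECONDITION & SPEC =====
def Spec_createIndexMap (iterable : String) (out : List (String × Int)) : Prop := out = createIndexMap_alt iterable
instance (iterable : String) (out : List (String × Int)) : Decidable (Spec_createIndexMap iterable out) := by unfold Spec_createIndexMap; infer_instance

-- ===== CLAIM (what is proved, stated in full; the proofs are below) =====
def Claim_equal_createIndexMap : Prop := ∀ (iterable : String), Dom_createIndexMap iterable → Spec_createIndexMap iterable (createIndexMap iterable)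

-- ===== LEMMAS AND PROOFS =====

@[simp] theorem mk1_inj (x c : Char) : (String.ofList [x] = String.ofList [c]) ↔ x = c := by
  constructor
  · intro h; have := congrArg String.toList h; simpa using this
  · rintro rfl; rfl

-- the items list of the rank dict once the uniques `us` are recorded
def enumD (us : List Char) : List (String × Int) :=
  (PySem.List.enumerate us 0).map (fun p => (String.ofList [p.2], p.1))

theorem enumD_append_singleton (us : List Char) (c : Char) :
    enumD (us ++ [c]) = enumD us ++ [(String.ofList [c], (us.length : Int))] := by
  simp [enumD, PySem.List.enumerate_append, PySem.List.enumerate_cons]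

-- A's loop invariant
theorem loop_inv (cs : List Char) (us : List Char) (d : PySem.Dict String Int)
    (hi : d.items = enumD us)
    (hc : ∀ x : Char, d.contains (String.ofList [x]) = us.contains x) :
    (cs.foldl
      (fun (st : PySem.Dict String Int × Int) c =>
        if st.1.contains (String.ofList [c]) then st
        else (st.1.insert (String.ofList [c]) st.2, st.2 + 1))
      (d, (us.length : Int))).1.items
      = enumD (cs.foldl PySem.Set.add us) := by
  induction cs generalizing us d with
  | nil => simpa using hi
  | cons c cs ih =>
    simp only [List.foldl_cons]
    rcases h : us.contains c with hf | ht
    · have hdc : d.contains (String.ofList [c]) = false := by rw [hc]; exact h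
      have hmem : c ∉ us := by simpa using h
      have hadd : PySem.Set.add us c = us ++ [c] := by
        simp [PySem.Set.add, PySem.Set.contains, hmem]
      rw [hdc]
      have hlen : (us.length : Int) + 1 = (((us ++ [c]).length : Nat) : Int) := by simp
      rw [hadd, hlen]
      apply ih
      · rw [PySem.Dict.items_insert_of_not_contains d _ hdc, hi, enumD_append_singleton]
      · intro x
        rw [PySem.Dict.contains_insert, hc]
        cases hx : (x == c)
        · have : (String.ofList [x] == String.ofList [c]) = false := by
            simpa [beq_iff_eq] using (by simpa [beq_iff_eq] using hx : ¬ x = c)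
          simp only [this, Bool.false_or]
          simp only [List.contains_append, List.contains_cons, List.contains_nil]
          cases hu : us.contains x <;> simp [hx]
        · have hxc : x = c := by simpa [beq_iff_eq] using hx
          subst hxc
          simp
    · have hdc : d.contains (String.ofList [c]) = true := by rw [hc]; exact h
      have hmem : c ∈ us := by simpa using h
      have hadd : PySem.Set.add us c = us := by
        simp [PySem.Set.add, PySem.Set.contains, hmem]
      rw [hdc]
      simp only [if_true]
      rw [hadd]
      exact ih us d hi hc

-- B's body, as a function of the character list
def altList (cs : List Char) : List (String × Int) :=
  (List.range cs.length).filterMap (fun i =>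
    if PySem.List.index? cs (cs.getD i default) = some i
    then some (String.ofList [cs.getD i default],
               ((PySem.Set.ofList (cs.take i)).length : Int))
    else none)

theorem dedup_append_singleton (cs : List Char) (c : Char) :
    PySem.List.dedup (cs ++ [c]) =
      PySem.List.dedup cs ++ (if c ∈ cs then [] else [c]) := by
  rw [PySem.List.dedup_eq_ofList, PySem.List.dedup_eq_ofList,
      PySem.Set.ofList_eq_foldl, PySem.Set.ofList_eq_foldl]
  rw [List.foldl_append]
  simp only [List.foldl_cons, List.foldl_nil]
  have hmemF : c ∈ List.foldl PySem.Set.add [] cs ↔ c ∈ cs := by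
    rw [← PySem.Set.ofList_eq_foldl]; exact PySem.Set.mem_ofList cs c
  by_cases h : c ∈ cs
  · simp [PySem.Set.add, hmemF, h]
  · simp [PySem.Set.add, hmemF, h]

theorem altList_eq (cs : List Char) : altList cs = enumD (PySem.List.dedup cs) := by
  induction cs using List.reverseRecOn with
  | nil => simp [altList, enumD, PySem.List.dedup]
  | append_singleton cs c ih =>
    unfold altList
    rw [List.length_append, List.length_singleton, List.range_succ, List.filterMap_append]
    have hstep : ∀ i, i < cs.length →
        (if PySem.List.index? (cs ++ [c]) ((cs ++ [c]).getD i default) = some i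
         then some (String.ofList [(cs ++ [c]).getD i default],
                    (((PySem.Set.ofList ((cs ++ [c]).take i)).length : Nat) : Int))
         else none)
        = (if PySem.List.index? cs (cs.getD i default) = some i
           then some (String.ofList [cs.getD i default],
                      (((PySem.Set.ofList (cs.take i)).length : Nat) : Int))
           else none) := by
      intro i hi
      have hget : (cs ++ [c]).getD i default = cs.getD i default := by
        simp [List.getD, List.getElem?_append_left hi]
      have htake : (cs ++ [c]).take i = cs.take i :=
        List.take_append_of_le_length (le_of_lt hi)
      have hidx : PySem.List.index? (cs ++ [c]) (cs.getD i default)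
          = PySem.List.index? cs (cs.getD i default) := by
        apply PySem.List.index?_append_of_mem
        have : cs.getD i default = cs[i] := by simp [List.getD, List.getElem?_eq_getElem hi]
        rw [this]; exact List.getElem_mem hi
      rw [hget, htake, hidx]
    have hmain : (List.range cs.length).filterMap (fun i =>
        if PySem.List.index? (cs ++ [c]) ((cs ++ [c]).getD i default) = some i
        then some (String.ofList [(cs ++ [c]).getD i default],
                   (((PySem.Set.ofList ((cs ++ [c]).take i)).length : Nat) : Int))
        else none) = altList cs := by
      unfold altList
      apply List.filterMap_congr
      intro i hi
      exact hstep i (List.mem_range.mp hi)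
    rw [hmain, ih, dedup_append_singleton]
    have hgetn : (cs ++ [c]).getD cs.length default = c := by
      simp [List.getD]
    have htaken : (cs ++ [c]).take cs.length = cs := by
      simp
    by_cases hmem : c ∈ cs
    · -- last index is not a first occurrence: the extra element contributes nothing
      have hne : PySem.List.index? (cs ++ [c]) c ≠ some cs.length := by
        rw [PySem.List.index?_append_of_mem _ hmem]
        intro h
        rcases PySem.List.getElem_of_index?_eq_some h with ⟨hk, _, _⟩
        exact absurd hk (lt_irrefl _)
      rw [List.filterMap_cons, hgetn, if_neg hne]
      simp [hmem]
    · have hidx : PySem.List.index? (cs ++ [c]) c = some cs.length :=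
        PySem.List.index?_append_singleton_self cs c hmem
      have hlen : (PySem.Set.ofList cs).length = (PySem.List.dedup cs).length := by
        rw [PySem.List.dedup_eq_ofList]
      rw [List.filterMap_cons, hgetn, if_pos hidx, htaken]
      simp [hmem, enumD_append_singleton, hlen]

-- ===== VERDICT (by name: the statement is the Claim_ definition above) =====
theorem createIndexMap_spec : Claim_equal_createIndexMap := by
  intro iterable _
  unfold Spec_createIndexMap createIndexMap createIndexMap_alt
  have hA := loop_inv iterable.toList [] PySem.Dict.empty
    (by simp [enumD, PySem.Dict.empty]) (by intro x; simp [PySem.Dict.empty])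
  have hB := altList_eq iterable.toList
  rw [PySem.List.dedup_eq_ofList, PySem.Set.ofList_eq_foldl] at hB
  simp only [altList] at hB
  rw [hB]
  exact hA
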